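-- pv_equiv track=rewrite | github.com/mifeng135/MFServer | MFServer/tools/buildProtoMsg.py | strip_proto_comments
-- ===== SOURCE A (Python) =====
-- def strip_proto_comments(text: str) -> str:
--     out: list[str] = []
--     i, n = 0, len(text)
--     while i < n:
--         if i + 1 < n and text[i : i + 2] == "//":
--             while i < n and text[i] != "\n":
--                 i += 1
--             continue
--         if i + 1 < n and text[i : i + 2] == "/*":
--             end = text.find("*/", i + 2)
--             if end == -1:
--                 break
--             i = end + 2
--             continue
--         out.append(text[i])
--         i += 1
--     return "".join(out)
-- ===== SOURCE B (Python) =====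
-- def strip_proto_comments(text: str) -> str:
--     # One-pass 5-state lexer (DFA) instead of A's index-jumping scanner.
--     CODE, SLASH, LINE, BLOCK, STAR = range(5)
--     state = CODE
--     out: list[str] = []
--     for c in text:
--         if state == CODE:
--             if c == "/":
--                 state = SLASH
--             else:
--                 out.append(c)
--         elif state == SLASH:
--             if c == "/":
--                 state = LINE
--             elif c == "*":
--                 state = BLOCK
--             else:
--                 out.append("/")
--                 out.append(c)
--                 state = CODE
--         elif state == LINE:
--             if c == "\n":
--                 out.append("\n")
--                 state = CODE
--         elif state == BLOCK:
--             if c == "*":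
--                 state = STAR
--         else:  # STAR
--             if c == "/":
--                 state = CODE
--             elif c != "*":
--                 state = BLOCK
--     if state == SLASH:
--         out.append("/")
--     return "".join(out)
-- ===== Notes on version B (the rewrite author's own statement) =====
-- stated objective: alternative
-- what changed: Replaces A's index-jumping scanner (inner skip-to-newline loop and str.find for '*/') with a single forward pass through the characters driven by a five-state lexer (CODE/SLASH/LINE/BLOCK/STAR).
import Mathlib
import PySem

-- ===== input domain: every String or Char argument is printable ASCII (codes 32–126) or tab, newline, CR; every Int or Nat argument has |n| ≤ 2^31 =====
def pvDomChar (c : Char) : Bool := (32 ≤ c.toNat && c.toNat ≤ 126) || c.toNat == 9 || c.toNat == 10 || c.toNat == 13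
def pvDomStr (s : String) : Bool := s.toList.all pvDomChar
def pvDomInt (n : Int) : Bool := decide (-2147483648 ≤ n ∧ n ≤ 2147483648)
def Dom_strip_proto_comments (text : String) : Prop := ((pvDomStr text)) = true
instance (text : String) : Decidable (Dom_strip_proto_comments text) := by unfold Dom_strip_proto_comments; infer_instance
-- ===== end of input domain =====

-- B replaces A's index-jumping scanner (inner skip loops / str.find) by a single-pass
-- five-state lexer; objective: alternative (same O(n) cost, different algorithm).

-- ===== PORT A =====
-- A's index i over text is carried as the suffix text[i:]; the inner
-- `while text[i] != '\n'` is the dropWhile (the two leading '/' are themselves ≠ '\n'),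
-- and text.find("*/", i+2) is PySem.Chars.find on the suffix after "/*".
def stripA_go : List Char → List Char
  | '/' :: '/' :: rest => stripA_go (rest.dropWhile (fun c => !(c = '\n')))
  | '/' :: '*' :: rest =>
      let e := PySem.Chars.find rest ['*', '/']
      if e = -1 then [] else stripA_go (rest.drop (e.toNat + 2))
  | c :: rest => c :: stripA_go rest
  | [] => []
  termination_by cs => cs.length
  decreasing_by
  · have := List.length_dropWhile_le (fun c => !(c = '\n')) rest
    simp; omega
  · simp [List.length_drop]; omega
  · simp

def strip_proto_comments (text : String) : String :=
  String.ofList (stripA_go text.toList)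

-- ===== PORT B =====
-- states: 0 = CODE, 1 = SLASH, 2 = LINE, 3 = BLOCK, 4 = STAR (as in Source B);
-- the for-loop with the `out` accumulator becomes this structural recursion.
def stripB_go : Nat → List Char → List Char
  | 0, c :: r => if c = '/' then stripB_go 1 r else c :: stripB_go 0 r
  | 1, c :: r =>
      if c = '/' then stripB_go 2 r
      else if c = '*' then stripB_go 3 r
      else '/' :: c :: stripB_go 0 r
  | 2, c :: r => if c = '\n' then '\n' :: stripB_go 0 r else stripB_go 2 r
  | 3, c :: r => if c = '*' then stripB_go 4 r else stripB_go 3 r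
  | _, c :: r => if c = '/' then stripB_go 0 r else if c = '*' then stripB_go 4 r else stripB_go 3 r
  | 1, [] => ['/']
  | _, [] => []

def strip_proto_comments_alt (text : String) : String :=
  String.ofList (stripB_go 0 text.toList)

-- ===== PRECONDITION & SPEC =====
def Spec_strip_proto_comments (text : String) (out : String) : Prop := out = strip_proto_comments_alt text
instance (text : String) (out : String) : Decidable (Spec_strip_proto_comments text out) := by unfold Spec_strip_proto_comments; infer_instance

-- ===== CLAIM (what is proved, stated in full; the proofs are below) =====
def Claim_equal_strip_proto_comments : Prop := ∀ (text : String), Dom_strip_proto_comments text → Spec_strip_proto_comments text (strip_proto_comments text)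

-- ===== LEMMAS AND PROOFS =====

theorem lineB (r : List Char) : stripB_go 2 r = stripB_go 0 (r.dropWhile (fun c => !(c = '\n'))) := by
  induction r with
  | nil => simp [stripB_go]
  | cons c t ih =>
    by_cases h : c = '\n'
    · subst h; simp [stripB_go, List.dropWhile]
    · simp [stripB_go, List.dropWhile, h, ih]

theorem find_go_shift (sub l : List Char) (k : Nat) :
    PySem.Chars.find.go sub l k =
      if PySem.Chars.find.go sub l 0 = -1 then -1 else PySem.Chars.find.go sub l 0 + k := by
  induction l generalizing k with
  | nil => simp [PySem.Chars.find.go]; split <;> simp_all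
  | cons c t ih =>
    simp only [PySem.Chars.find.go]
    split
    · simp
    · rw [ih (k+1), ih 1]
      have hq : -1 ≤ PySem.Chars.find.go sub t 0 := PySem.Chars.neg_one_le_find t sub
      by_cases h : PySem.Chars.find.go sub t 0 = -1
      · simp [h]
      · simp only [if_neg h]; rw [if_neg (by omega)]; push_cast; ring

theorem find_cons (c : Char) (t sub : List Char) :
    PySem.Chars.find (c :: t) sub =
      if sub.isPrefixOf (c :: t) then 0
      else if PySem.Chars.find t sub = -1 then -1 else PySem.Chars.find t sub + 1 := by
  show PySem.Chars.find.go sub (c :: t) 0 = _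
  simp only [PySem.Chars.find.go]
  split
  · simp_all
  · simp_all [PySem.Chars.find]
    exact find_go_shift sub t 1

theorem blockB (r : List Char) :
    stripB_go 3 r =
      if PySem.Chars.find r ['*','/'] = -1 then []
      else stripB_go 0 (r.drop ((PySem.Chars.find r ['*','/']).toNat + 2)) := by
  induction hn : r.length using Nat.strong_induction_on generalizing r with
  | _ n ih =>
  match r with
  | [] => simp [stripB_go, PySem.Chars.find, PySem.Chars.find.go]
  | c :: t =>
    by_cases hc : c = '*'
    · subst hc
      match t with
      | [] => simp [stripB_go, PySem.Chars.find, PySem.Chars.find.go, List.isPrefixOf]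
      | d :: u =>
        by_cases hd : d = '/'
        · subst hd
          have h0 : PySem.Chars.find ('*' :: '/' :: u) ['*','/'] = 0 := by
            rw [find_cons]; simp [List.isPrefixOf]
          rw [h0]
          simp [stripB_go]
        · have h1 : PySem.Chars.find ('*' :: d :: u) ['*','/'] =
              if PySem.Chars.find (d :: u) ['*','/'] = -1 then -1
              else PySem.Chars.find (d :: u) ['*','/'] + 1 := by
            rw [find_cons]
            have : ¬ List.isPrefixOf ['*','/'] ('*' :: d :: u) = true := by
              simp [List.isPrefixOf]
              intro h; exact absurd h.symm hd
            rw [if_neg this]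
          have hlhs : stripB_go 3 ('*' :: d :: u) = stripB_go 4 (d :: u) := by
            simp [stripB_go]
          rw [hlhs]
          by_cases hds : d = '*'
          · subst hds
            have hne : -1 ≤ PySem.Chars.find ('*' :: u) ['*','/'] :=
              PySem.Chars.neg_one_le_find _ _
            have h4 : stripB_go 4 ('*' :: u) = stripB_go 3 ('*' :: u) := by
              simp [stripB_go]
            rw [h4, ih ('*' :: u).length (by subst hn; simp) ('*' :: u) rfl, h1]
            by_cases h : PySem.Chars.find ('*' :: u) ['*','/'] = -1
            · simp [h]
            · rw [if_neg h, if_neg (by omega), if_neg h]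
              rw [show ((PySem.Chars.find ('*' :: u) ['*','/'] + 1).toNat + 2)
                    = ((PySem.Chars.find ('*' :: u) ['*','/']).toNat + 2) + 1 from by omega]
              simp [List.drop_succ_cons]
          · have hne : -1 ≤ PySem.Chars.find u ['*','/'] :=
              PySem.Chars.neg_one_le_find _ _
            have h4 : stripB_go 4 (d :: u) = stripB_go 3 u := by
              simp [stripB_go, hd, hds]
            have h2 : PySem.Chars.find (d :: u) ['*','/'] =
                if PySem.Chars.find u ['*','/'] = -1 then -1
                else PySem.Chars.find u ['*','/'] + 1 := by
              rw [find_cons]; simp [List.isPrefixOf]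
              intro h; exact absurd h.symm hds
            rw [h2] at h1
            rw [h4, ih u.length (by subst hn; simp) u rfl]
            by_cases h : PySem.Chars.find u ['*','/'] = -1
            · simp [h] at h1
              simp [h, h1]
            · rw [if_neg h, if_neg (by omega)] at h1
              rw [h1, if_neg h, if_neg (by omega)]
              rw [show ((PySem.Chars.find u ['*','/'] + 1 + 1).toNat + 2)
                    = (((PySem.Chars.find u ['*','/']).toNat + 2) + 1) + 1 from by omega]
              simp [List.drop_succ_cons]
    · have hne : -1 ≤ PySem.Chars.find t ['*','/'] := PySem.Chars.neg_one_le_find _ _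
      have hlhs : stripB_go 3 (c :: t) = stripB_go 3 t := by
        simp [stripB_go, hc]
      have h1 : PySem.Chars.find (c :: t) ['*','/'] =
          if PySem.Chars.find t ['*','/'] = -1 then -1
          else PySem.Chars.find t ['*','/'] + 1 := by
        rw [find_cons]; simp [List.isPrefixOf]
        intro h; exact absurd h.symm hc
      rw [hlhs, ih t.length (by subst hn; simp) t rfl, h1]
      by_cases h : PySem.Chars.find t ['*','/'] = -1
      · simp [h]
      · rw [if_neg h, if_neg (by omega), if_neg h]
        rw [show ((PySem.Chars.find t ['*','/'] + 1).toNat + 2)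
              = ((PySem.Chars.find t ['*','/']).toNat + 2) + 1 from by omega]
        simp [List.drop_succ_cons]

theorem main_go : ∀ cs : List Char, stripA_go cs = stripB_go 0 cs := by
  intro cs
  induction hn : cs.length using Nat.strong_induction_on generalizing cs with
  | _ n ih =>
  match cs with
  | [] => simp [stripA_go, stripB_go]
  | c :: rest =>
    by_cases hc : c = '/'
    · subst hc
      match rest with
      | [] => simp [stripA_go, stripB_go]
      | d :: t =>
        by_cases hd : d = '/'
        · subst hd
          have hA : stripA_go ('/' :: '/' :: t) = stripA_go (t.dropWhile (fun c => !(c = '\n'))) := by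
            simp [stripA_go]
          have hB : stripB_go 0 ('/' :: '/' :: t) = stripB_go 2 t := by
            simp [stripB_go]
          rw [hA, hB, lineB,
              ih (t.dropWhile (fun c => !(c = '\n'))).length
                (by subst hn; have := List.length_dropWhile_le (fun c => !(c = '\n')) t; simp; omega)
                _ rfl]
        · by_cases hs : d = '*'
          · subst hs
            have hA : stripA_go ('/' :: '*' :: t) =
                if PySem.Chars.find t ['*','/'] = -1 then []
                else stripA_go (t.drop ((PySem.Chars.find t ['*','/']).toNat + 2)) := by
              simp [stripA_go]
            have hB : stripB_go 0 ('/' :: '*' :: t) = stripB_go 3 t := by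
              simp [stripB_go]
            rw [hA, hB, blockB]
            by_cases h : PySem.Chars.find t ['*','/'] = -1
            · simp [h]
            · rw [if_neg h, if_neg h,
                  ih (t.drop ((PySem.Chars.find t ['*','/']).toNat + 2)).length
                    (by subst hn; simp [List.length_drop]; omega) _ rfl]
          · have hA : stripA_go ('/' :: d :: t) = '/' :: stripA_go (d :: t) := by
              simp [stripA_go, hd, hs]
            have hA2 : stripA_go (d :: t) = d :: stripA_go t := by
              simp [stripA_go, hd]
            have hB : stripB_go 0 ('/' :: d :: t) = '/' :: d :: stripB_go 0 t := by
              simp [stripB_go, hd, hs]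
            rw [hA, hA2, hB, ih t.length (by subst hn; simp) _ rfl]
    · have hA : stripA_go (c :: rest) = c :: stripA_go rest := by
        simp [stripA_go, hc]
      have hB : stripB_go 0 (c :: rest) = c :: stripB_go 0 rest := by
        simp [stripB_go, hc]
      rw [hA, hB, ih rest.length (by subst hn; simp) _ rfl]

-- ===== VERDICT (by name: the statement is the Claim_ definition above) =====
theorem strip_proto_comments_spec : Claim_equal_strip_proto_comments := by
  intro text _
  unfold Spec_strip_proto_comments strip_proto_comments strip_proto_comments_alt
  rw [main_go]
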